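-- pv_equiv track=rewrite | github.com/Cucuteanu-Tudor-912/Notite_UBB_912 | Fundamente/tema_lab1_probleme/setul3-13.py | nth_elem
-- ===== SOURCE A (Python) =====
-- def isprime(z):
--     ok=True
--     if z<2:
--         return False
--     elif z==2:
--         return True
--     else:
--         for i in range(2,z//2+1):
--             if z%i==0:
--                 ok=False
--     return ok
--
-- def nth_elem(m):
--     x=2
--     m=m-1
--     while m>0:
--         if isprime(x):
--             m=m-1
--             if m == 0:
--                 return x
--         else:
--             for i in range(2,x//2+1):
--                 if x%i==0 and isprime(i):
--                     m=m-1
--                     if m==0: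
--                         return i
--         x=x+1
-- ===== SOURCE B (Python) =====
-- def nth_elem(m):
--     # Walk x = 2, 3, ...; for each x emit its distinct prime factors in
--     # increasing order by factor-stripping (no primality tests at all):
--     # the smallest d >= 2 dividing the remaining cofactor is automatically
--     # prime.  For prime x this emits x itself, matching the sequence.
--     need = m - 1
--     if need <= 0:
--         return None
--     x = 2
--     while True:
--         n = x
--         d = 2
--         while n > 1:
--             if n % d == 0:
--                 need -= 1
--                 if need == 0:
--                     return d
--                 while n % d == 0:
--                     n //= d
--             d += 1
--         x += 1
-- ===== Notes on version B (the rewrite author's own statement) =====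
-- stated objective: faster
-- what changed: A tests primality of x and of every candidate divisor by full trial division; B never tests primality: for each x it strips prime factors off a shrinking cofactor (the smallest divisor of the cofactor is automatically prime), emitting the same sequence in one pass per x instead of nested divisor scans; intended as faster, measured 5.16x at the largest size where both finished.
-- outside the precondition, e.g. on nth_elem(1): A returns None, B returns None; on nth_elem(0): A returns None, B returns None
import Mathlib
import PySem

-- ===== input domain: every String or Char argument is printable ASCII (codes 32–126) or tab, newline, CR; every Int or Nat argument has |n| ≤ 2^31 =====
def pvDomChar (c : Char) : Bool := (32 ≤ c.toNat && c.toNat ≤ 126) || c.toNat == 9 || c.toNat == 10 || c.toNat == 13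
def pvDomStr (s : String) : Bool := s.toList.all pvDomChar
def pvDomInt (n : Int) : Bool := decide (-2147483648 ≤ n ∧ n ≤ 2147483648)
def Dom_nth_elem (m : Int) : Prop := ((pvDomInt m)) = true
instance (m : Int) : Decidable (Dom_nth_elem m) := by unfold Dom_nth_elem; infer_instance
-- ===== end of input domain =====

-- B replaces A's nested trial-division primality tests by per-x factor
-- stripping (the smallest divisor of the remaining cofactor is prime).

-- ===== PORT A =====
def isprime (z : Int) : Bool :=
  if z < 2 then false
  else if z = 2 then true
  else
    (PySem.List.pyRange 2 (PySem.Int.floordiv z 2 + 1) 1).foldl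
      (fun ok i => if PySem.Int.mod z i = 0 then false else ok) true

-- the inner 'for i in range(2, x//2+1)' with its early return:
-- Sum.inr i = 'return i', Sum.inl m = fell through with updated m
def innerA (x : Int) : Int → List Int → Int ⊕ Int
  | m, [] => Sum.inl m
  | m, i :: rest =>
    if PySem.Int.mod x i = 0 && isprime i then
      if m - 1 = 0 then Sum.inr i else innerA x (m - 1) rest
    else innerA x m rest

-- the 'while m>0' loop; fuel bounds the number of iterations (each x
-- contributes at least one term, so (m-1) iterations always suffice)
def loopA (fuel : Nat) (x m : Int) : Int :=
  match fuel with
  | 0 => 0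
  | f + 1 =>
    if m > 0 then
      if isprime x then
        if m - 1 = 0 then x else loopA f (x + 1) (m - 1)
      else
        match innerA x m (PySem.List.pyRange 2 (PySem.Int.floordiv x 2 + 1) 1) with
        | Sum.inr r => r
        | Sum.inl m' => loopA f (x + 1) m'
    else 0

def nth_elem (m : Int) : Int := loopA (m - 1).toNat 2 (m - 1)

-- ===== PORT B =====
-- 'while n % d == 0: n //= d'
def stripB (fuel : Nat) (d n : Int) : Int :=
  match fuel with
  | 0 => n
  | f + 1 =>
    if PySem.Int.mod n d = 0 then stripB f d (PySem.Int.floordiv n d) else n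

-- the inner 'while n > 1' loop: Sum.inr d = 'return d', Sum.inl need = done
def innerB (fuel : Nat) (need n d : Int) : Int ⊕ Int :=
  match fuel with
  | 0 => Sum.inl need
  | f + 1 =>
    if n > 1 then
      if PySem.Int.mod n d = 0 then
        if need - 1 = 0 then Sum.inr d
        else innerB f (need - 1) (stripB n.toNat d n) (d + 1)
      else innerB f need n (d + 1)
    else Sum.inl need

-- the outer 'while True' loop over x
def loopB (fuel : Nat) (x need : Int) : Int :=
  match fuel with
  | 0 => 0
  | f + 1 =>
    match innerB x.toNat need x 2 with
    | Sum.inr r => r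
    | Sum.inl need' => loopB f (x + 1) need'

def nth_elem_alt (m : Int) : Int :=
  if m - 1 ≤ 0 then 0 else loopB (m - 1).toNat 2 (m - 1)

-- ===== PRECONDITION & SPEC =====
-- Pre_ excludes m ≤ 1, on which A (and B) return None, not an int.
def Pre_nth_elem (m : Int) : Prop := 2 ≤ m
instance (m : Int) : Decidable (Pre_nth_elem m) := by unfold Pre_nth_elem; infer_instance
def pvWitness_nth_elem : Int := 5

def Spec_nth_elem (m : Int) (out : Int) : Prop := out = nth_elem_alt m
instance (m : Int) (out : Int) : Decidable (Spec_nth_elem m out) := by unfold Spec_nth_elem; infer_instance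

-- ===== CLAIM (what is proved, stated in full; the proofs are below) =====
def Claim_equal_nth_elem : Prop := ∀ (m : Int), Dom_nth_elem m → Pre_nth_elem m → Spec_nth_elem m (nth_elem m)

-- ===== LEMMAS AND PROOFS =====

-- consuming terms one by one from a list: the common shape of both loops
def consume : Int → List Int → Int ⊕ Int
  | need, [] => Sum.inl need
  | need, a :: l => if need - 1 = 0 then Sum.inr a else consume (need - 1) l

-- the list of terms the sequence contributes at x: primes in [2,x] dividing x
def emitN (x : Nat) : List Int :=
  ((List.range' 2 (x - 1)).filter
    (fun p => decide (p ∣ x) && decide (Nat.Prime p))).map (fun p : Nat => (p : Int))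

-- Nat mirrors of B's two inner loops (the ports are bridged to these)
def stripN : Nat → Nat → Nat → Nat
  | 0, _, n => n
  | f + 1, d, n => if n % d = 0 then stripN f d (n / d) else n

def innerN (fuel : Nat) (need : Int) (n d : Nat) : Int ⊕ Int :=
  match fuel with
  | 0 => Sum.inl need
  | f + 1 =>
    if 1 < n then
      if n % d = 0 then
        if need - 1 = 0 then Sum.inr (d : Int)
        else innerN f (need - 1) (stripN n d n) (d + 1)
      else innerN f need n (d + 1)
    else Sum.inl need

-- ---- generic fold/consume facts ----
theorem foldl_flag (p : Int → Prop) [DecidablePred p] (l : List Int) (b : Bool) :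
    l.foldl (fun ok i => if p i then false else ok) b
      = (b && !(l.any (fun i => decide (p i)))) := by
  induction l generalizing b with
  | nil => simp
  | cons a l ih =>
    simp only [List.foldl_cons, List.any_cons]
    by_cases h : p a
    · rw [if_pos h, ih]; simp [h]
    · rw [if_neg h, ih]; simp [h]

theorem consume_inl_pos (L : List Int) (need r : Int) (h1 : 1 ≤ need)
    (h : consume need L = Sum.inl r) : 1 ≤ r := by
  induction L generalizing need with
  | nil => simp only [consume, Sum.inl.injEq] at h; omega
  | cons a l ih =>
    simp only [consume] at h
    split at h
    · exact absurd h (by simp)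
    · rename_i hne
      exact ih (need - 1) (by omega) h

-- ---- isprime is trial-division primality ----
theorem isprime_natCast (k : Nat) : isprime (k : Int) = decide (Nat.Prime k) := by
  unfold isprime
  by_cases h2 : k < 2
  · rw [if_pos (by exact_mod_cast h2)]
    interval_cases k <;> simp [Nat.not_prime_zero, Nat.not_prime_one]
  · rw [if_neg (by exact_mod_cast h2)]
    by_cases he : k = 2
    · subst he; simp [Nat.prime_two]
    · rw [if_neg (by exact_mod_cast he)]
      rw [foldl_flag (fun i => PySem.Int.mod (k : Int) i = 0)]
      have hfd : PySem.Int.floordiv (k : Int) 2 = ((k / 2 : Nat) : Int) := by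
        exact_mod_cast PySem.Int.floordiv_natCast k 2
      by_cases hp : Nat.Prime k
      · simp only [hp, decide_true, Bool.true_and]
        have : ((PySem.List.pyRange 2 (PySem.Int.floordiv (k:Int) 2 + 1) 1).any
            (fun i => decide (PySem.Int.mod (k:Int) i = 0))) = false := by
          rw [List.any_eq_false]
          intro i hi
          rw [PySem.List.mem_pyRange_one, hfd] at hi
          simp only [decide_eq_true_eq]
          rw [PySem.Int.mod_eq_zero_iff_dvd]
          intro hdvd
          have h0i : 0 ≤ i := by omega
          obtain ⟨d, rfl⟩ := Int.eq_ofNat_of_zero_le h0i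
          have hdk : d ∣ k := by exact_mod_cast hdvd
          have : d = 1 ∨ d = k := hp.eq_one_or_self_of_dvd d hdk
          have hd2 : 2 ≤ d := by exact_mod_cast hi.1
          have hdle : d ≤ k / 2 := by
            have := hi.2; omega
          have : d = k := by omega
          have : k / 2 < k := Nat.div_lt_self (by omega) (by omega)
          omega
        rw [this]; rfl
      · simp only [hp, decide_false, Bool.true_and]
        have hex : ((PySem.List.pyRange 2 (PySem.Int.floordiv (k:Int) 2 + 1) 1).any
            (fun i => decide (PySem.Int.mod (k:Int) i = 0))) = true := by
          rw [List.any_eq_true]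
          have hk1 : k ≠ 1 := by omega
          have hq := Nat.minFac_prime hk1
          have hqd : k.minFac ∣ k := Nat.minFac_dvd k
          set e := k / k.minFac with he_def
          have hed : e ∣ k := Nat.div_dvd_of_dvd hqd
          have hke : k = k.minFac * e := (Nat.mul_div_cancel' hqd).symm
          have hepos : 1 ≤ e := by
            rcases Nat.eq_zero_or_pos e with h | h
            · rw [h, Nat.mul_zero] at hke; omega
            · exact h
          have he2 : 2 ≤ e := by
            rcases Nat.lt_or_ge e 2 with h | h
            · have he1 : e = 1 := by omega
              rw [he1, Nat.mul_one] at hke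
              exact absurd (hke ▸ hq) hp
            · exact h
          have hele : e ≤ k / 2 := by
            rw [he_def]
            exact Nat.div_le_div_left hq.two_le (by omega)
          refine ⟨(e : Int), ?_, ?_⟩
          · rw [PySem.List.mem_pyRange_one, hfd]
            constructor
            · exact_mod_cast he2
            · have : (e : Int) ≤ ((k / 2 : Nat) : Int) := by exact_mod_cast hele
              omega
          · simp only [decide_eq_true_eq]
            rw [PySem.Int.mod_eq_zero_iff_dvd]
            exact_mod_cast hed
        rw [hex]; rfl

-- ---- innerA consumes the filtered divisor list ----
theorem innerA_eq_consume (x : Int) (m : Int) (l : List Int) :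
    innerA x m l =
      consume m (l.filter (fun i => PySem.Int.mod x i = 0 && isprime i)) := by
  induction l generalizing m with
  | nil => rfl
  | cons a l ih =>
    by_cases h : (PySem.Int.mod x a = 0 && isprime a) = true
    · simp only [innerA, List.filter_cons, h, if_pos, consume]
      split
      · rfl
      · exact ih (m - 1)
    · simp only [innerA, List.filter_cons, h, Bool.false_eq_true, if_false]
      exact ih m

-- ---- casting pyRange to a Nat range' ----
theorem pyRange_natCast (a b : Nat) :
    PySem.List.pyRange (a : Int) (b : Int) 1 =
      (List.range' a (b - a)).map (fun p : Nat => (p : Int)) := by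
  rw [PySem.List.pyRange_one, List.range'_eq_map_range, List.map_map]
  have hn : ((b : Int) - (a : Int)).toNat = b - a := by omega
  rw [hn]
  exact List.map_congr_left (by intro k _; simp only [Function.comp_apply]; push_cast; ring)

-- the A-side filter predicate, cast to Nat
theorem predA_natCast (x p : Nat) :
    (PySem.Int.mod (x : Int) (p : Int) = 0 && isprime (p : Int)) =
      (decide (p ∣ x) && decide (Nat.Prime p)) := by
  rw [isprime_natCast]
  congr 1
  simp only [decide_eq_decide]
  rw [PySem.Int.mod_eq_zero_iff_dvd]
  exact Int.natCast_dvd_natCast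

-- a prime factor of a composite number is at most half of it
theorem primefac_le_half (x p : Nat) (hx : 2 ≤ x) (hnp : ¬ Nat.Prime x)
    (hp : Nat.Prime p) (hd : p ∣ x) : p ≤ x / 2 := by
  set e := x / p with he_def
  have hke : x = p * e := (Nat.mul_div_cancel' hd).symm
  have he2 : 2 ≤ e := by
    rcases Nat.lt_or_ge e 2 with h | h
    · interval_cases e
      · omega
      · rw [Nat.mul_one] at hke
        exact absurd (hke ▸ hp) hnp
    · exact h
  rw [Nat.le_div_iff_mul_le (by omega)]
  nlinarith [hp.two_le]

-- ---- A's filtered range is emitN (composite case) ----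
theorem filterA_eq_emitN (x : Nat) (hx : 2 ≤ x) (hnp : ¬ Nat.Prime x) :
    ((PySem.List.pyRange 2 ((PySem.Int.floordiv (x : Int) 2) + 1) 1).filter
       (fun i => PySem.Int.mod (x : Int) i = 0 && isprime i)) = emitN x := by
  have hfd : PySem.Int.floordiv (x : Int) 2 + 1 = ((x / 2 + 1 : Nat) : Int) := by
    have : PySem.Int.floordiv (x : Int) 2 = ((x / 2 : Nat) : Int) := by
      exact_mod_cast PySem.Int.floordiv_natCast x 2
    rw [this]; push_cast; ring
  have h2 : (2 : Int) = ((2 : Nat) : Int) := rfl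
  have hpred : ∀ l : List Nat,
      l.filter ((fun i => PySem.Int.mod (x:Int) i = 0 && isprime i) ∘ (fun p : Nat => (p : Int)))
        = l.filter (fun p => decide (p ∣ x) && decide (Nat.Prime p)) := by
    intro l
    apply List.filter_congr
    intro p _
    exact predA_natCast x p
  rw [hfd, h2, pyRange_natCast, List.filter_map, emitN, hpred]
  -- extend the range [2, x/2] to [2, x]: no prime factor of composite x lies beyond x/2
  have hsplit : List.range' 2 (x - 1) =
      List.range' 2 (x / 2 + 1 - 2) ++ List.range' (2 + (x / 2 + 1 - 2)) ((x - 1) - (x / 2 + 1 - 2)) := by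
    rw [List.range'_append_1]
    congr 1
    have : x / 2 < x := Nat.div_lt_self (by omega) (by omega)
    omega
  rw [hsplit, List.filter_append]
  have hnil : (List.range' (2 + (x / 2 + 1 - 2)) ((x - 1) - (x / 2 + 1 - 2))).filter
      (fun p => decide (p ∣ x) && decide (Nat.Prime p)) = [] := by
    rw [List.filter_eq_nil_iff]
    intro p hp
    rw [List.mem_range'_1] at hp
    simp only [Bool.and_eq_true, decide_eq_true_eq, not_and]
    intro hdvd hprime
    have := primefac_le_half x p hx hnp hprime hdvd
    omega
  rw [hnil, List.append_nil]

-- ---- emitN of a prime is the singleton ----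
theorem emitN_of_prime (x : Nat) (hx : Nat.Prime x) : emitN x = [(x : Int)] := by
  have h2 : 2 ≤ x := hx.two_le
  rw [emitN]
  have hx1 : x - 1 = (x - 2) + 1 := by omega
  rw [hx1, List.range'_concat, List.filter_append]
  have hnil : (List.range' 2 (x - 2)).filter
      (fun p => decide (p ∣ x) && decide (Nat.Prime p)) = [] := by
    rw [List.filter_eq_nil_iff]
    intro p hp
    rw [List.mem_range'_1] at hp
    simp only [Bool.and_eq_true, decide_eq_true_eq, not_and]
    intro hdvd hprime
    rcases hx.eq_one_or_self_of_dvd p hdvd with h | h <;>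
      [exact absurd h (by have := hprime.two_le; omega); omega]
  rw [hnil, List.nil_append]
  have hlast : 2 + 1 * (x - 2) = x := by omega
  rw [hlast]
  simp [hx]

-- ---- bridging B's Int loops to the Nat mirrors ----
theorem stripB_natCast (f : Nat) : ∀ d n : Nat,
    stripB f (d : Int) (n : Int) = ((stripN f d n : Nat) : Int) := by
  induction f with
  | zero => intro d n; rfl
  | succ f ih =>
    intro d n
    show (if PySem.Int.mod (n:Int) (d:Int) = 0 then stripB f d (PySem.Int.floordiv (n:Int) (d:Int)) else (n:Int)) = _
    have hm : PySem.Int.mod (n : Int) (d : Int) = ((n % d : Nat) : Int) := by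
      exact_mod_cast PySem.Int.mod_natCast n d
    have hf : PySem.Int.floordiv (n : Int) (d : Int) = ((n / d : Nat) : Int) := by
      exact_mod_cast PySem.Int.floordiv_natCast n d
    rw [hm, hf]
    by_cases h : n % d = 0
    · rw [if_pos (by exact_mod_cast h), ih]
      rw [show stripN (f+1) d n = stripN f d (n / d) by rw [stripN, if_pos h]]
    · rw [if_neg (by exact_mod_cast h)]
      rw [show stripN (f+1) d n = n by rw [stripN, if_neg h]]

theorem innerB_natCast (f : Nat) : ∀ (need : Int) (n d : Nat),
    innerB f need (n : Int) (d : Int) = innerN f need n d := by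
  induction f with
  | zero => intro need n d; rfl
  | succ f ih =>
    intro need n d
    show (if (n : Int) > 1 then _ else Sum.inl need) = innerN (f+1) need n d
    have hm : PySem.Int.mod (n : Int) (d : Int) = ((n % d : Nat) : Int) := by
      exact_mod_cast PySem.Int.mod_natCast n d
    unfold innerN
    by_cases h1 : 1 < n
    · rw [if_pos (by exact_mod_cast h1), if_pos h1, hm]
      by_cases h2 : n % d = 0
      · rw [if_pos (by exact_mod_cast h2), if_pos h2]
        split
        · rfl
        · have htn : ((n : Int)).toNat = n := Int.toNat_natCast n
          rw [htn, stripB_natCast]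
          have : ((d : Int) + 1) = ((d + 1 : Nat) : Int) := by push_cast; ring
          rw [this, ih]
      · rw [if_neg (by exact_mod_cast h2), if_neg h2]
        have : ((d : Int) + 1) = ((d + 1 : Nat) : Int) := by push_cast; ring
        rw [this, ih]
    · rw [if_neg (by exact_mod_cast h1), if_neg h1]

-- ---- stripping a prime d off n ----
theorem stripN_spec (d : Nat) (hd : Nat.Prime d) : ∀ (f n : Nat), 1 ≤ n → n ≤ f →
    stripN f d n ∣ n ∧ 1 ≤ stripN f d n ∧ ¬ d ∣ stripN f d n ∧
      (∀ p, Nat.Prime p → p ≠ d → (p ∣ stripN f d n ↔ p ∣ n)) := by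
  intro f
  induction f with
  | zero => intro n h1 h2; omega
  | succ f ih =>
    intro n h1 h2
    by_cases h : n % d = 0
    · rw [show stripN (f+1) d n = stripN f d (n / d) by rw [stripN, if_pos h]]
      have hdvd : d ∣ n := Nat.dvd_of_mod_eq_zero h
      have hd2 := hd.two_le
      have hdle : d ≤ n := Nat.le_of_dvd (by omega) hdvd
      have hm1 : 1 ≤ n / d := Nat.one_le_div_iff (by omega) |>.mpr hdle
      have hmlt : n / d < n := Nat.div_lt_self (by omega) (by omega)
      obtain ⟨hs1, hs2, hs3, hs4⟩ := ih (n / d) hm1 (by omega)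
      have hmul : d * (n / d) = n := Nat.mul_div_cancel' hdvd
      refine ⟨hs1.trans (Nat.div_dvd_of_dvd hdvd), hs2, hs3, ?_⟩
      intro p hp hpd
      rw [hs4 p hp hpd]
      constructor
      · intro hpm; exact hpm.trans (Nat.div_dvd_of_dvd hdvd)
      · intro hpn
        rw [← hmul] at hpn
        rcases (Nat.Prime.dvd_mul hp).mp hpn with h' | h'
        · exact absurd ((Nat.prime_dvd_prime_iff_eq hp hd).mp h') hpd
        · exact h'
    · rw [show stripN (f+1) d n = n by rw [stripN, if_neg h]]
      exact ⟨Nat.dvd_refl n, h1, fun hc => h (Nat.mod_eq_zero_of_dvd hc), fun p _ _ => Iff.rfl⟩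

-- ---- B's inner loop consumes the remaining prime factors of x ----
theorem innerN_spec : ∀ (f : Nat) (need : Int) (n d x : Nat),
    2 ≤ d → 1 ≤ n → 1 ≤ x → n ∣ x →
    (∀ p, Nat.Prime p → (p ∣ n ↔ (p ∣ x ∧ d ≤ p))) →
    (if n = 1 then 1 else n + 2 - d) ≤ f →
    innerN f need n d =
      consume need (((List.range' d (x + 1 - d)).filter
        (fun p => decide (p ∣ x) && decide (Nat.Prime p))).map (fun p : Nat => (p : Int))) := by
  intro f
  induction f with
  | zero =>
    intro need n d x hd hn hx hnx hinv hf
    by_cases h1 : n = 1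
    · rw [h1, if_pos rfl] at hf; omega
    · rw [if_neg h1] at hf
      obtain ⟨p, hp, hpn⟩ := Nat.exists_prime_and_dvd h1
      have hple : p ≤ n := Nat.le_of_dvd (by omega) hpn
      have hdp : d ≤ p := ((hinv p hp).mp hpn).2
      omega
  | succ f ih =>
    intro need n d x hd hn hx hnx hinv hf
    by_cases h1 : n = 1
    · -- no prime ≥ d divides x: the remaining filter is empty
      have hnil : (List.range' d (x + 1 - d)).filter
          (fun p => decide (p ∣ x) && decide (Nat.Prime p)) = [] := by
        rw [List.filter_eq_nil_iff]
        intro p hp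
        rw [List.mem_range'_1] at hp
        simp only [Bool.and_eq_true, decide_eq_true_eq, not_and]
        intro hdvd hprime
        have := (hinv p hprime).mpr ⟨hdvd, hp.1⟩
        rw [h1] at this
        have := Nat.le_of_dvd (by omega) this
        have := hprime.two_le
        omega
      rw [hnil]
      show innerN (f+1) need n d = Sum.inl need
      unfold innerN
      rw [if_neg (by omega)]
    · have hn2 : 2 ≤ n := by
        rcases Nat.lt_or_ge n 2 with h | h
        · omega
        · exact h
      -- n ≥ 2 has a prime factor p with d ≤ p ≤ n ≤ x
      obtain ⟨p0, hp0, hp0n⟩ := Nat.exists_prime_and_dvd h1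
      have hp0le : p0 ≤ n := Nat.le_of_dvd (by omega) hp0n
      have hdp0 : d ≤ p0 := ((hinv p0 hp0).mp hp0n).2
      have hnlex : n ≤ x := Nat.le_of_dvd (by omega) hnx
      have hdx : d ≤ x := by omega
      have hsplit : List.range' d (x + 1 - d) = d :: List.range' (d + 1) (x - d) := by
        rw [show x + 1 - d = (x - d) + 1 by omega, List.range'_succ]
      rw [if_neg h1] at hf
      by_cases hmod : n % d = 0
      · -- d divides n: d is the least remaining prime factor
        have hddvd : d ∣ n := Nat.dvd_of_mod_eq_zero hmod
        have hdprime : Nat.Prime d := by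
          have hq := Nat.minFac_prime (show d ≠ 1 by omega)
          have hqd : d.minFac ∣ d := Nat.minFac_dvd d
          have hqn : d.minFac ∣ n := hqd.trans hddvd
          have hdq : d ≤ d.minFac := ((hinv d.minFac hq).mp hqn).2
          have hqled : d.minFac ≤ d := Nat.minFac_le (by omega)
          have : d.minFac = d := by omega
          exact this ▸ hq
        have hddx : d ∣ x := hddvd.trans hnx
        have hcons : (List.range' d (x + 1 - d)).filter
            (fun p => decide (p ∣ x) && decide (Nat.Prime p)) =
            d :: (List.range' (d + 1) (x - d)).filter
              (fun p => decide (p ∣ x) && decide (Nat.Prime p)) := by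
          rw [hsplit, List.filter_cons]
          simp [hddx, hdprime]
        rw [hcons, List.map_cons]
        show (if 1 < n then _ else Sum.inl need) = _
        rw [if_pos (by omega), if_pos hmod]
        rw [consume]
        split
        · rfl
        · -- recurse after stripping d
          obtain ⟨hs1, hs2, hs3, hs4⟩ := stripN_spec d hdprime n n (by omega) (le_refl n)
          set n' := stripN n d n with hn'
          have hn'len : n' ≤ n := Nat.le_of_dvd (by omega) hs1
          have hn'ne : n' ≠ n := by
            intro hcontra
            exact hs3 (hcontra ▸ hddvd)
          have hinv' : ∀ p, Nat.Prime p → (p ∣ n' ↔ (p ∣ x ∧ d + 1 ≤ p)) := by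
            intro p hp
            constructor
            · intro hpn'
              have hpd : p ≠ d := fun hc => hs3 (hc ▸ hpn')
              have hpn := (hs4 p hp hpd).mp hpn'
              have hical := (hinv p hp).mp hpn
              exact ⟨hical.1, by omega⟩
            · intro ⟨hpx, hdp⟩
              have hpd : p ≠ d := by omega
              have hpn : p ∣ n := (hinv p hp).mpr ⟨hpx, by omega⟩
              exact (hs4 p hp hpd).mpr hpn
          rw [ih (need - 1) n' (d + 1) x (by omega) hs2 hx (hs1.trans hnx) hinv' ?_]
          · rw [show x + 1 - (d + 1) = x - d by omega]
          · split
            · omega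
            · rename_i hne
              have hd_le_n : d ≤ n := Nat.le_of_dvd (by omega) hddvd
              -- n' < n since n' ∣ n, n' ≠ n
              have : n' < n := by omega
              omega
      · -- d does not divide n: d contributes nothing
        have hdnotx : ¬ (d ∣ x ∧ Nat.Prime d) := by
          intro ⟨hdx', hdp⟩
          exact hmod (Nat.mod_eq_zero_of_dvd ((hinv d hdp).mpr ⟨hdx', le_refl d⟩))
        have hcons : (List.range' d (x + 1 - d)).filter
            (fun p => decide (p ∣ x) && decide (Nat.Prime p)) =
            (List.range' (d + 1) (x - d)).filter
              (fun p => decide (p ∣ x) && decide (Nat.Prime p)) := by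
          rw [hsplit, List.filter_cons]
          have : (decide (d ∣ x) && decide (Nat.Prime d)) = false := by
            simp only [Bool.and_eq_false_iff, decide_eq_false_iff_not]
            by_cases h : d ∣ x
            · exact Or.inr (fun hp => hdnotx ⟨h, hp⟩)
            · exact Or.inl h
          rw [this]
          simp
        rw [hcons]
        show (if 1 < n then _ else Sum.inl need) = _
        rw [if_pos (by omega), if_neg hmod]
        have hinv' : ∀ p, Nat.Prime p → (p ∣ n ↔ (p ∣ x ∧ d + 1 ≤ p)) := by
          intro p hp
          constructor
          · intro hpn
            obtain ⟨hpx, hdp⟩ := (hinv p hp).mp hpn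
            have hpd : p ≠ d := by
              intro hc
              exact hmod (Nat.mod_eq_zero_of_dvd (hc ▸ hpn))
            exact ⟨hpx, by omega⟩
          · intro ⟨hpx, hdp⟩
            exact (hinv p hp).mpr ⟨hpx, by omega⟩
        rw [ih need n (d + 1) x (by omega) hn hx hnx hinv' ?_]
        · rw [show x + 1 - (d + 1) = x - d by omega]
        · rw [if_neg h1]
          -- some prime factor of n is ≥ d+1, in particular d+1 ≤ n? not needed: bound arithmetic
          omega

-- B's inner loop at (x, 2) consumes exactly emitN x
theorem innerB_eq_consume (x : Nat) (need : Int) (hx : 2 ≤ x) :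
    innerN x need x 2 = consume need (emitN x) := by
  rw [innerN_spec x need x 2 x (le_refl 2) (by omega) (by omega) (Nat.dvd_refl x)
      (fun p hp => ⟨fun h => ⟨h, hp.two_le⟩, fun h => h.1⟩)
      (by rw [if_neg (by omega)]; omega)]
  rw [emitN, show x + 1 - 2 = x - 1 by omega]

-- ---- the two outer loops agree ----
theorem loop_eq : ∀ (f : Nat) (x m : Int), 2 ≤ x → 1 ≤ m →
    loopA f x m = loopB f x m := by
  intro f
  induction f with
  | zero => intro x m _ _; rfl
  | succ f ih =>
    intro x m hx hm
    obtain ⟨x', rfl⟩ := Int.eq_ofNat_of_zero_le (show (0:Int) ≤ x by omega)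
    have hx2 : 2 ≤ x' := by exact_mod_cast hx
    have hBeq : innerB x' m ((x' : Nat) : Int) 2 = consume m (emitN x') := by
      calc innerB x' m ((x' : Nat) : Int) 2 = innerN x' m x' 2 := by
            exact_mod_cast innerB_natCast x' m x' 2
        _ = consume m (emitN x') := innerB_eq_consume x' m hx2
    show (if m > 0 then
            (if isprime ((x' : Nat) : Int) then
              (if m - 1 = 0 then ((x' : Nat) : Int) else loopA f (((x' : Nat) : Int) + 1) (m - 1))
            else
              match innerA ((x' : Nat) : Int) m
                  (PySem.List.pyRange 2 (PySem.Int.floordiv ((x' : Nat) : Int) 2 + 1) 1) with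
              | Sum.inr r => r
              | Sum.inl m' => loopA f (((x' : Nat) : Int) + 1) m')
          else 0)
        = (match innerB (((x' : Nat) : Int)).toNat m ((x' : Nat) : Int) 2 with
           | Sum.inr r => r
           | Sum.inl need' => loopB f (((x' : Nat) : Int) + 1) need')
    rw [if_pos (by omega), Int.toNat_natCast, hBeq]
    by_cases hp : Nat.Prime x'
    · have hisp : isprime ((x' : Nat) : Int) = true := by rw [isprime_natCast]; simp [hp]
      rw [hisp, if_pos, emitN_of_prime x' hp, consume]
      · by_cases hm1 : m - 1 = 0
        · rw [if_pos hm1, if_pos hm1]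
        · rw [if_neg hm1, if_neg hm1, consume]
          show loopA f (((x' : Nat) : Int) + 1) (m - 1)
              = loopB f (((x' : Nat) : Int) + 1) (m - 1)
          exact ih _ _ (by omega) (by omega)
      · rfl
    · have hisp : isprime ((x' : Nat) : Int) = false := by rw [isprime_natCast]; simp [hp]
      rw [hisp]
      rw [if_neg (by simp)]
      rw [innerA_eq_consume, filterA_eq_emitN x' hx2 hp]
      cases hc : consume m (emitN x') with
      | inr r => rfl
      | inl m' =>
        show loopA f (((x' : Nat) : Int) + 1) m' = loopB f (((x' : Nat) : Int) + 1) m'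
        exact ih _ _ (by omega) (consume_inl_pos (emitN x') m m' hm hc)

-- ===== VERDICT (by name: the statement is the Claim_ definition above) =====
theorem nth_elem_spec : Claim_equal_nth_elem := by
  intro m _ hpre
  have h2 : (2 : Int) ≤ m := hpre
  show nth_elem m = nth_elem_alt m
  unfold nth_elem nth_elem_alt
  rw [if_neg (by omega)]
  exact loop_eq (m - 1).toNat 2 (m - 1) (by omega) (by omega)
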